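-- pv_equiv track=rewrite | github.com/jheikkila42/sea_watch | sea_watch_10.py | count_work_periods
-- ===== SOURCE A (Python) =====
-- def count_work_periods(work):
--     periods = 0
--     in_work = False
--     for w in work:
--         if w and not in_work:
--             periods += 1
--             in_work = True
--         elif not w:
--             in_work = False
--     return periods
-- ===== SOURCE B (Python) =====
-- from itertools import groupby
--
-- def count_work_periods(work):
--     return sum(1 for key, _ in groupby(work, key=bool) if key)
-- ===== Notes on version B (the rewrite author's own statement) =====
-- stated objective: idiomatic
-- what changed: Replaces the manual in_work state machine with itertools.groupby segmentation by truthiness, counting the truthy runs.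
import Mathlib
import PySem

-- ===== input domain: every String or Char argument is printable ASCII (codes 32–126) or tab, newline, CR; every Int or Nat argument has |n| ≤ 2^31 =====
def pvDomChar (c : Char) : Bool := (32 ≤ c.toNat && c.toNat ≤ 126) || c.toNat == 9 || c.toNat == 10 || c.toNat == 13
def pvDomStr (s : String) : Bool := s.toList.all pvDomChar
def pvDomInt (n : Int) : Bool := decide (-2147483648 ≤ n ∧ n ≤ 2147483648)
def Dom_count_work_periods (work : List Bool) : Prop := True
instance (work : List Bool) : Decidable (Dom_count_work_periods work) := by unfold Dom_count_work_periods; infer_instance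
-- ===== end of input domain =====

-- B replaces A's manual in_work state machine with groupby-style run segmentation (idiomatic).

-- ===== PORT A =====
-- the for-loop over (periods, in_work), as structural recursion over the same state
def cwpLoop (periods : Int) (in_work : Bool) : List Bool → Int
  | [] => periods
  | w :: rest =>
    if w && !in_work then cwpLoop (periods + 1) true rest
    else if !w then cwpLoop periods false rest
    else cwpLoop periods in_work rest

def count_work_periods (work : List Bool) : Int := cwpLoop 0 false work

-- ===== PORT B =====
-- groupby(work, key=bool): peel one maximal run of equal truthiness at a time; count truthy runs
def cwpRuns : List Bool → Int
  | [] => 0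
  | b :: rest =>
    (if b then 1 else 0) + cwpRuns (rest.dropWhile (· == b))
termination_by xs => xs.length
decreasing_by
  have := List.length_dropWhile_le (· == b) rest
  simp only [List.length_cons]; omega

def count_work_periods_alt (work : List Bool) : Int := cwpRuns work

-- ===== PRECONDITION & SPEC =====
def Spec_count_work_periods (work : List Bool) (out : Int) : Prop := out = count_work_periods_alt work
instance (work : List Bool) (out : Int) : Decidable (Spec_count_work_periods work out) := by unfold Spec_count_work_periods; infer_instance

-- ===== CLAIM (what is proved, stated in full; the proofs are below) =====
def Claim_equal_count_work_periods : Prop := ∀ (work : List Bool), Dom_count_work_periods work → Spec_count_work_periods work (count_work_periods work)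

-- ===== LEMMAS AND PROOFS =====

-- the accumulator adds on
theorem cwpLoop_acc (p : Int) (inw : Bool) (xs : List Bool) :
    cwpLoop p inw xs = p + cwpLoop 0 inw xs := by
  induction xs generalizing p inw with
  | nil => simp [cwpLoop]
  | cons w rest ih =>
    cases w <;> cases inw <;> simp only [cwpLoop, Bool.and_self, Bool.not_true,
      Bool.not_false, Bool.and_true, Bool.and_false,
      if_true, if_false, Bool.false_eq_true]
    · exact ih p false
    · exact ih p false
    · rw [ih, ih (0+1)]; ring
    · exact ih p true

-- while in_work, A skips exactly a maximal run of trues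
theorem cwpLoop_true_drop (p : Int) (xs : List Bool) :
    cwpLoop p true xs = cwpLoop p false (xs.dropWhile (· == true)) := by
  induction xs generalizing p with
  | nil => simp [cwpLoop, List.dropWhile]
  | cons w rest ih =>
    by_cases hw : w <;> simp [cwpLoop, hw, List.dropWhile, ih]

-- leading falses contribute nothing to B's run count
theorem cwpRuns_dropFalse (xs : List Bool) :
    cwpRuns (xs.dropWhile (· == false)) = cwpRuns xs := by
  induction xs with
  | nil => simp [List.dropWhile]
  | cons w rest ih =>
    by_cases hw : w
    · simp [List.dropWhile, hw]
    · simp only [hw] at *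
      simp [List.dropWhile, cwpRuns]

theorem cwpLoop_eq_runs (xs : List Bool) : cwpLoop 0 false xs = cwpRuns xs := by
  induction hn : xs.length using Nat.strong_induction_on generalizing xs with
  | _ n ih =>
    match xs, hn with
    | [], _ => simp [cwpLoop, cwpRuns]
    | w :: rest, hn =>
      by_cases hw : w
      · subst hw
        have hlen : (rest.dropWhile (· == true)).length < n := by
          have h1 := List.length_dropWhile_le (· == true) rest
          simp only [List.length_cons] at hn; omega
        simp only [cwpLoop, cwpRuns]
        rw [cwpLoop_acc, cwpLoop_true_drop,
            ih _ hlen (rest.dropWhile (· == true)) rfl]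
        simp
      · simp only [hw] at *
        have hlen : rest.length < n := by
          simp only [List.length_cons] at hn; omega
        simp only [cwpLoop, cwpRuns]
        rw [ih _ hlen rest rfl, ← cwpRuns_dropFalse rest]
        simp

-- ===== VERDICT (by name: the statement is the Claim_ definition above) =====
theorem count_work_periods_spec : Claim_equal_count_work_periods := by
  intro work _
  unfold Spec_count_work_periods count_work_periods count_work_periods_alt
  exact cwpLoop_eq_runs work
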